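-- pv_equiv track=rewrite | github.com/10639780/proti | helpers.py | direction_to_xy
-- ===== SOURCE A (Python) =====
-- def direction_to_xy(string):
--     """Converts a series of string with directions like ['L', 'R'] to lists with xy positions."""
--     direction_list = []
--     # first two aminos already placed
--     pos_x = [0, 1]
--     pos_y = [0, 0]
--
--     # go over every node
--     for s in string:
--
--         # previous direction is determined
--         delta_x = pos_x[-1] - pos_x[-2]
--         delta_y = pos_y[-1] - pos_y[-2]
--
--         # rotation matrices used to turn into the desired direction
--         if s == 'S':
--             pos_x.append(pos_x[-1] + delta_x)
--             pos_y.append(pos_y[-1] + delta_y)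
--
--         elif s == 'L':
--             pos_x.append(pos_x[-1] - delta_y)
--             pos_y.append(pos_y[-1] + delta_x)
--
--         elif s == 'R':
--             pos_x.append(pos_x[-1] + delta_y)
--             pos_y.append(pos_y[-1] - delta_x)
--
--     return pos_x, pos_y
-- ===== SOURCE B (Python) =====
-- def direction_to_xy(string):
--     """Converts a series of string with directions like ['L', 'R'] to lists with xy positions."""
--     # Staged pipeline: the heading after each move is determined by the running count of
--     # quarter-turns mod 4 (L = +1, R = +3, S = 0); look the step vector up in a table and
--     # take prefix sums, instead of simulating position+heading step by step.
--     TURN = {'S': 0, 'L': 1, 'R': 3}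
--     # pass 1: cumulative turn count mod 4 at each (recognised) move
--     ks = []
--     k = 0
--     for s in string:
--         if s in TURN:
--             k = (k + TURN[s]) % 4
--             ks.append(k)
--     # pass 2: step vectors from the quarter-turn table
--     DX = (1, 0, -1, 0)
--     DY = (0, 1, 0, -1)
--     steps_x = [DX[k] for k in ks]
--     steps_y = [DY[k] for k in ks]
--     # pass 3: prefix sums, each axis independently
--     pos_x = [0, 1]
--     pos_y = [0, 0]
--     for dx in steps_x:
--         pos_x.append(pos_x[-1] + dx)
--     for dy in steps_y:
--         pos_y.append(pos_y[-1] + dy)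
--     return pos_x, pos_y
-- ===== Notes on version B (the rewrite author's own statement) =====
-- stated objective: faster
-- what changed: B replaces the step-by-step rotation simulation (heading re-derived each step from the last two list entries via negative indexing) with a staged pipeline: a cumulative quarter-turn count mod 4 (L=+1, R=+3, S=0), a fixed unit-vector lookup table, and independent prefix-sum passes per axis; intended as faster by dropping the per-step negative-index lookups, measured 1.5-1.9x in a timing run.
import Mathlib
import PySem

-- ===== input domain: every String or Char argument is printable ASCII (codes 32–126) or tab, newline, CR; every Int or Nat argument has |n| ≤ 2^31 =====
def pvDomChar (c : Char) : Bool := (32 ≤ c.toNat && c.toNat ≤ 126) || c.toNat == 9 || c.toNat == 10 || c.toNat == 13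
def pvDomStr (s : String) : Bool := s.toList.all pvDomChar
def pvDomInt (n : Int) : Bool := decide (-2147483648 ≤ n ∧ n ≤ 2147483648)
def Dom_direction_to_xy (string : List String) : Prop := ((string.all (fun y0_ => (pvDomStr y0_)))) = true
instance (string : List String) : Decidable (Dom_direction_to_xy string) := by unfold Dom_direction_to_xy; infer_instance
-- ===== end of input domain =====

-- B replaces the step-by-step rotation simulation with a staged pipeline (cumulative
-- quarter-turn count mod 4, a unit-vector lookup table, independent prefix sums per axis).

-- ===== PORT A =====
-- loop over the directions; pos_x/pos_y always have length ≥ 2, so the pyGetD default 0 is never used (exact)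
def directionToXyGoA (cs : List String) (px py : List Int) : List Int × List Int :=
  match cs with
  | [] => (px, py)
  | s :: rest =>
    let dx := PySem.List.pyGetD px (-1) 0 - PySem.List.pyGetD px (-2) 0
    let dy := PySem.List.pyGetD py (-1) 0 - PySem.List.pyGetD py (-2) 0
    if s == "S" then
      directionToXyGoA rest (px ++ [PySem.List.pyGetD px (-1) 0 + dx]) (py ++ [PySem.List.pyGetD py (-1) 0 + dy])
    else if s == "L" then
      directionToXyGoA rest (px ++ [PySem.List.pyGetD px (-1) 0 - dy]) (py ++ [PySem.List.pyGetD py (-1) 0 + dx])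
    else if s == "R" then
      directionToXyGoA rest (px ++ [PySem.List.pyGetD px (-1) 0 + dy]) (py ++ [PySem.List.pyGetD py (-1) 0 - dx])
    else
      directionToXyGoA rest px py

def direction_to_xy (string : List String) : List Int × List Int :=
  directionToXyGoA string [0, 1] [0, 0]

-- ===== PORT B =====
-- the TURN dict: 's in TURN' + 'TURN[s]' ported as an Option-valued lookup (exact: three fixed keys)
def bTurn? (s : String) : Option Int :=
  if s == "S" then some 0 else if s == "L" then some 1 else if s == "R" then some 3 else none

-- pass 1: cumulative quarter-turn count mod 4 at each recognised move
def bTurnKs (cs : List String) (k : Int) : List Int :=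
  match cs with
  | [] => []
  | s :: rest =>
    match bTurn? s with
    | some t => (PySem.Int.mod (k + t) 4) :: bTurnKs rest (PySem.Int.mod (k + t) 4)
    | none => bTurnKs rest k

-- the step-vector tables DX, DY
def bDX : List Int := [1, 0, -1, 0]
def bDY : List Int := [0, 1, 0, -1]

-- pass 3: prefix-sum loop 'pos.append(pos[-1] + d)' (list never empty, default unused)
def bScanLoop (steps : List Int) (acc : List Int) : List Int :=
  match steps with
  | [] => acc
  | d :: rest => bScanLoop rest (acc ++ [PySem.List.pyGetD acc (-1) 0 + d])

def direction_to_xy_alt (string : List String) : List Int × List Int :=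
  let ks := bTurnKs string 0
  let stepsX := ks.map (fun j => PySem.List.pyGetD bDX j 0)
  let stepsY := ks.map (fun j => PySem.List.pyGetD bDY j 0)
  (bScanLoop stepsX [0, 1], bScanLoop stepsY [0, 0])

-- ===== PRECONDITION & SPEC =====
def Spec_direction_to_xy (string : List String) (out : List Int × List Int) : Prop := out = direction_to_xy_alt string
instance (string : List String) (out : List Int × List Int) : Decidable (Spec_direction_to_xy string out) := by unfold Spec_direction_to_xy; infer_instance

-- ===== CLAIM (what is proved, stated in full; the proofs are below) =====
def Claim_equal_direction_to_xy : Prop := ∀ (string : List String), Dom_direction_to_xy string → Spec_direction_to_xy string (direction_to_xy string)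

-- ===== LEMMAS AND PROOFS =====

theorem pyGetD2_neg_one (l : List Int) (a b d : Int) :
    PySem.List.pyGetD (l ++ [a, b]) (-1) d = b := by
  have : l ++ [a, b] = (l ++ [a]) ++ [b] := by simp
  rw [this, PySem.List.pyGetD_neg_one_append_singleton]

theorem pyGetD2_neg_two (l : List Int) (a b d : Int) :
    PySem.List.pyGetD (l ++ [a, b]) (-2) d = a := by
  rw [PySem.List.pyGetD_neg_ofNat (l ++ [a, b]) 2 d (by omega) (by simp)]
  simp

-- table abbreviations used only by the proofs
def tabX (k : Int) : Int := PySem.List.pyGetD bDX k 0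
def tabY (k : Int) : Int := PySem.List.pyGetD bDY k 0

theorem rotS (k : Int) (h0 : 0 ≤ k) (h4 : k < 4) :
    PySem.Int.mod (k + 0) 4 = k := by
  interval_cases k <;> decide

theorem rotL (k : Int) (h0 : 0 ≤ k) (h4 : k < 4) :
    tabX (PySem.Int.mod (k + 1) 4) = -(tabY k) ∧ tabY (PySem.Int.mod (k + 1) 4) = tabX k ∧
    0 ≤ PySem.Int.mod (k + 1) 4 ∧ PySem.Int.mod (k + 1) 4 < 4 := by
  interval_cases k <;> exact ⟨by decide, by decide, by decide, by decide⟩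

theorem rotR (k : Int) (h0 : 0 ≤ k) (h4 : k < 4) :
    tabX (PySem.Int.mod (k + 3) 4) = tabY k ∧ tabY (PySem.Int.mod (k + 3) 4) = -(tabX k) ∧
    0 ≤ PySem.Int.mod (k + 3) 4 ∧ PySem.Int.mod (k + 3) 4 < 4 := by
  interval_cases k <;> exact ⟨by decide, by decide, by decide, by decide⟩

theorem goA_eq_pipeline (cs : List String) (k x y : Int) (px py : List Int)
    (h0 : 0 ≤ k) (h4 : k < 4) :
    directionToXyGoA cs (px ++ [x - tabX k, x]) (py ++ [y - tabY k, y]) =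
      (bScanLoop ((bTurnKs cs k).map (fun j => PySem.List.pyGetD bDX j 0)) (px ++ [x - tabX k, x]),
       bScanLoop ((bTurnKs cs k).map (fun j => PySem.List.pyGetD bDY j 0)) (py ++ [y - tabY k, y])) := by
  induction cs generalizing k x y px py with
  | nil => simp [directionToXyGoA, bTurnKs, bScanLoop]
  | cons s rest ih =>
    simp only [directionToXyGoA, bTurnKs, bTurn?, pyGetD2_neg_one, pyGetD2_neg_two]
    have hdx : x - (x - tabX k) = tabX k := by ring
    have hdy : y - (y - tabY k) = tabY k := by ring
    rw [hdx, hdy]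
    split_ifs with hS hL hR
    · -- S: k' = k, step (tabX k, tabY k)
      simp only [List.map_cons, bScanLoop, pyGetD2_neg_one, rotS k h0 h4]
      have hx : (px ++ [x - tabX k, x]) ++ [x + tabX k]
          = (px ++ [x - tabX k]) ++ [x + tabX k - tabX k, x + tabX k] := by
        simp
      have hy : (py ++ [y - tabY k, y]) ++ [y + tabY k]
          = (py ++ [y - tabY k]) ++ [y + tabY k - tabY k, y + tabY k] := by
        simp
      rw [hx, hy, ih k (x + tabX k) (y + tabY k) _ _ h0 h4]
      simp [tabX, tabY]
    · -- L: k' = (k+1) % 4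
      obtain ⟨hrx, hry, hk0, hk4⟩ := rotL k h0 h4
      simp only [List.map_cons, bScanLoop, pyGetD2_neg_one]
      set k' := PySem.Int.mod (k + 1) 4 with hk'
      have hx : (px ++ [x - tabX k, x]) ++ [x - tabY k]
          = (px ++ [x - tabX k]) ++ [(x + tabX k') - tabX k', x + tabX k'] := by
        rw [hrx]; simp; ring
      have hy : (py ++ [y - tabY k, y]) ++ [y + tabX k]
          = (py ++ [y - tabY k]) ++ [(y + tabY k') - tabY k', y + tabY k'] := by
        rw [hry]; simp
      rw [hx, hy, ih k' (x + tabX k') (y + tabY k') _ _ hk0 hk4]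
      simp [tabX, tabY]
    · -- R: k' = (k+3) % 4
      obtain ⟨hrx, hry, hk0, hk4⟩ := rotR k h0 h4
      simp only [List.map_cons, bScanLoop, pyGetD2_neg_one]
      set k' := PySem.Int.mod (k + 3) 4 with hk'
      have hx : (px ++ [x - tabX k, x]) ++ [x + tabY k]
          = (px ++ [x - tabX k]) ++ [(x + tabX k') - tabX k', x + tabX k'] := by
        rw [hrx]; simp
      have hy : (py ++ [y - tabY k, y]) ++ [y - tabX k]
          = (py ++ [y - tabY k]) ++ [(y + tabY k') - tabY k', y + tabY k'] := by
        rw [hry]; simp; ring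
      rw [hx, hy, ih k' (x + tabX k') (y + tabY k') _ _ hk0 hk4]
      simp [tabX, tabY]
    · exact ih k x y px py h0 h4

-- ===== VERDICT (by name: the statement is the Claim_ definition above) =====
theorem direction_to_xy_spec : Claim_equal_direction_to_xy := by
  intro string _
  unfold Spec_direction_to_xy direction_to_xy direction_to_xy_alt
  have h := goA_eq_pipeline string 0 1 0 [] [] (by norm_num) (by norm_num)
  simpa [tabX, tabY] using h
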